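-- pv_equiv track=rewrite | github.com/unnatisinghal7/CSCI-561-AI | HW2/my_player3.py | find_died_pieces
-- ===== SOURCE A (Python) =====
-- def detect_neighbor(board, i, j):
--     neighbors = []
--     # Detect borders and add neighbor coordinates
--     if i > 0: neighbors.append((i-1, j))
--     if i < len(board) - 1: neighbors.append((i+1, j))
--     if j > 0: neighbors.append((i, j-1))
--     if j < len(board) - 1: neighbors.append((i, j+1))
--     return neighbors
--
-- def detect_neighbor_ally(board, i, j):
--     neighbors = detect_neighbor(board, i, j)  # Detect neighbors
--     group_allies = []
--     # Iterate through neighbors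
--     for piece in neighbors:
--         # Add to allies list if having the same color
--         if board[piece[0]][piece[1]] == board[i][j]:
--             group_allies.append(piece)
--     return group_allies
--
-- def ally_dfs(board, i, j):
--     stack = [(i, j)]  # stack for DFS search
--     ally_members = []  # record allies positions during the search
--     while stack:
--         piece = stack.pop()
--         ally_members.append(piece)
--         neighbor_allies = detect_neighbor_ally(board, piece[0], piece[1])
--         for ally in neighbor_allies:
--             if ally not in stack and ally not in ally_members:
--                 stack.append(ally)
--     return ally_members
--
-- def find_liberty_positions(board, i, j):
--     # have to implement set so that we do not count liberty for an element twice
--     liberty_places = set()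
--     ally_members = ally_dfs(board, i, j)
--     for member in ally_members:
--         neighbors = detect_neighbor(board, member[0], member[1])
--         for piece in neighbors:
--             # If there is empty space around a piece, it has liberty
--             if board[piece[0]][piece[1]] == 0:
--                 liberty_places.add((piece[0], piece[1]))
--
--     # If none of the pieces in a allied group has an empty space, it has no liberty
--     return liberty_places
--
-- def find_died_pieces(board, piece_type):
--     died_pieces = []
--
--     for i in range(len(board)):
--         for j in range(len(board)):
--             # Check if there is a piece at this position:
--             if board[i][j] == piece_type:
--                 # The piece die if it has no liberty
--                 if len(find_liberty_positions(board, i, j)) == 0: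
--                     died_pieces.append((i,j))
--     return died_pieces
-- ===== SOURCE B (Python) =====
-- def find_died_pieces(board, piece_type):
--     # Reverse reachability in one sweep: seed every piece_type stone that
--     # touches an empty cell, spread "alive" through same-colored neighbors
--     # once, then list the stones never reached (row-major).
--     n = len(board)
--     alive = set()
--     queue = []
--     for i in range(n):
--         for j in range(n):
--             if board[i][j] == piece_type and any(board[a][b] == 0 for (a, b) in _neighbors(n, i, j)):
--                 alive.add((i, j))
--                 queue.append((i, j))
--     while queue:
--         x, y = queue.pop()
--         for (a, b) in _neighbors(n, x, y):
--             if board[a][b] == piece_type and (a, b) not in alive: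
--                 alive.add((a, b))
--                 queue.append((a, b))
--     return [(i, j) for i in range(n) for j in range(n)
--             if board[i][j] == piece_type and (i, j) not in alive]
--
-- def _neighbors(n, i, j):
--     out = []
--     if i > 0: out.append((i - 1, j))
--     if i < n - 1: out.append((i + 1, j))
--     if j > 0: out.append((i, j - 1))
--     if j < n - 1: out.append((i, j + 1))
--     return out
-- ===== Notes on version B (the rewrite author's own statement) =====
-- stated objective: alternative
-- what changed: A rediscovers each stone's whole group by DFS (with linear stack/membership scans) and recomputes its liberty set separately for every stone; B instead does one multi-source sweep: it seeds every piece_type stone adjacent to an empty cell, spreads 'alive' once through same-colored neighbors with a visited set, and returns the never-reached stones in row-major order.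
import Mathlib
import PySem

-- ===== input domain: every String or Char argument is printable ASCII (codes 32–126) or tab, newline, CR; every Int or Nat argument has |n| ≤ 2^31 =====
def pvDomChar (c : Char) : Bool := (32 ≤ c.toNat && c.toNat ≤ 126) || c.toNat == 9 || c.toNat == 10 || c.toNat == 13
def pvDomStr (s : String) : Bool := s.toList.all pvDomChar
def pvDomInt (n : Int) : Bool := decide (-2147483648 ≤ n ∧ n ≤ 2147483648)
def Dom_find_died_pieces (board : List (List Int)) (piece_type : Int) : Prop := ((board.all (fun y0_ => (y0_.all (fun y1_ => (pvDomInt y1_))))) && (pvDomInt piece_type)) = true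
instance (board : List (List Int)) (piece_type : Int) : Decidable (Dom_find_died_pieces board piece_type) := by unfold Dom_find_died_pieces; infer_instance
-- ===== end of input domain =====

-- B replaces A's per-stone DFS + per-stone liberty set by ONE multi-source sweep from the
-- liberty-touching stones (objective: alternative). Under Pre_ (no row shorter than the board),
-- board[x][y] is in range wherever either program reads it; both ports read cells through
-- the same total helper `cellAt` (default 0), exact on Pre_.
def cellAt (board : List (List Int)) (i j : Int) : Int :=
  PySem.List.pyGetD (PySem.List.pyGetD board i []) j 0

-- ===== PORT A =====
-- detect_neighbor: the four guarded appends, in Python's order.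
def detect_neighbor (board : List (List Int)) (i j : Int) : List (Int × Int) :=
  let n : Int := PySem.List.len board
  ((((if i > 0 then [((i-1 : Int), j)] else []) ++
     (if i < n - 1 then [((i+1 : Int), j)] else [])) ++
     (if j > 0 then [(i, (j-1 : Int))] else [])) ++
     (if j < n - 1 then [(i, (j+1 : Int))] else []))

def detect_neighbor_ally (board : List (List Int)) (i j : Int) : List (Int × Int) :=
  (detect_neighbor board i j).foldl
    (fun acc p => if cellAt board p.1 p.2 = cellAt board i j then acc ++ [p] else acc) []

-- Python's while-loop with stack.append/stack.pop (the END of the list): the stack is kept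
-- REVERSED here, so pop = head and each push = cons; fuel n*n+1 is enough whenever the
-- start is on the board (proved below), so this computes exactly A's loop there.
def allyDfsLoop (board : List (List Int)) : Nat → List (Int × Int) → List (Int × Int) → List (Int × Int)
  | 0, _, members => members
  | _ + 1, [], members => members
  | f + 1, p :: rest, members =>
      let members' := members ++ [p]
      let stack' := (detect_neighbor_ally board p.1 p.2).foldl
        (fun st a => if a ∈ st ∨ a ∈ members' then st else a :: st) rest
      allyDfsLoop board f stack' members'

def ally_dfs (board : List (List Int)) (i j : Int) : List (Int × Int) :=
  allyDfsLoop board (board.length * board.length + 1) [(i, j)] []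

def find_liberty_positions (board : List (List Int)) (i j : Int) : PySem.Set (Int × Int) :=
  (ally_dfs board i j).foldl
    (fun s m =>
      (detect_neighbor board m.1 m.2).foldl
        (fun s p => if cellAt board p.1 p.2 = 0 then PySem.Set.add s (p.1, p.2) else s) s)
    PySem.Set.empty

def find_died_pieces (board : List (List Int)) (piece_type : Int) : List (Int × Int) :=
  let n : Int := PySem.List.len board
  (PySem.List.pyRange 0 n 1).foldl
    (fun acc i =>
      (PySem.List.pyRange 0 n 1).foldl
        (fun acc j =>
          if cellAt board i j = piece_type then
            (if PySem.Set.len (find_liberty_positions board i j) = 0 then acc ++ [(i, j)] else acc)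
          else acc)
        acc)
    []

-- ===== PORT B =====
-- _neighbors(n, i, j) from Source B (identical shape to A's detect_neighbor, parameterised by n).
def bNeighbors (n : Int) (i j : Int) : List (Int × Int) :=
  ((((if i > 0 then [((i-1 : Int), j)] else []) ++
     (if i < n - 1 then [((i+1 : Int), j)] else [])) ++
     (if j > 0 then [(i, (j-1 : Int))] else [])) ++
     (if j < n - 1 then [(i, (j+1 : Int))] else []))

-- the while-loop over the worklist; queue.append/pop at the END = cons/head on the reversed list;
-- fuel n*n+1 suffices (proved below).
def bSweep (board : List (List Int)) (piece_type : Int) :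
    Nat → PySem.Set (Int × Int) → List (Int × Int) → PySem.Set (Int × Int)
  | 0, alive, _ => alive
  | _ + 1, alive, [] => alive
  | f + 1, alive, p :: rest =>
      let st := (bNeighbors (PySem.List.len board) p.1 p.2).foldl
        (fun (st : PySem.Set (Int × Int) × List (Int × Int)) a =>
          if cellAt board a.1 a.2 = piece_type ∧ ¬ (a ∈ st.1) then
            (PySem.Set.add st.1 a, a :: st.2)
          else st)
        (alive, rest)
      bSweep board piece_type f st.1 st.2

def find_died_pieces_alt (board : List (List Int)) (piece_type : Int) : List (Int × Int) :=
  let n : Int := PySem.List.len board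
  -- seeding pass: every piece_type stone with an empty neighbor goes into alive and the queue
  let seeded : PySem.Set (Int × Int) × List (Int × Int) :=
    (PySem.List.pyRange 0 n 1).foldl
      (fun acc i =>
        (PySem.List.pyRange 0 n 1).foldl
          (fun (acc : PySem.Set (Int × Int) × List (Int × Int)) j =>
            if cellAt board i j = piece_type ∧
                (bNeighbors n i j).any (fun a => cellAt board a.1 a.2 == 0) then
              (PySem.Set.add acc.1 (i, j), (i, j) :: acc.2)
            else acc)
          acc)
      (PySem.Set.empty, [])
  let alive := bSweep board piece_type (board.length * board.length + 1) seeded.1 seeded.2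
  (PySem.List.pyRange 0 n 1).foldl
    (fun acc i =>
      (PySem.List.pyRange 0 n 1).foldl
        (fun acc j =>
          if cellAt board i j = piece_type ∧ ¬ ((i, j) ∈ alive) then acc ++ [(i, j)] else acc)
        acc)
    []

-- ===== PRECONDITION & SPEC =====
-- Pre_ excludes exactly the ragged boards on which Python A raises IndexError (some row
-- shorter than the number of rows); B raises there too.
def Pre_find_died_pieces (board : List (List Int)) (piece_type : Int) : Prop :=
  ∀ row ∈ board, board.length ≤ row.length
instance (board : List (List Int)) (piece_type : Int) : Decidable (Pre_find_died_pieces board piece_type) := by unfold Pre_find_died_pieces; infer_instance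

def pvWitness_find_died_pieces : List (List Int) × Int := ([[1, 0], [2, 1]], 1)

def Spec_find_died_pieces (board : List (List Int)) (piece_type : Int) (out : List (Int × Int)) : Prop := out = find_died_pieces_alt board piece_type
instance (board : List (List Int)) (piece_type : Int) (out : List (Int × Int)) : Decidable (Spec_find_died_pieces board piece_type out) := by unfold Spec_find_died_pieces; infer_instance

-- ===== CLAIM (what is proved, stated in full; the proofs are below) =====
def Claim_equal_find_died_pieces : Prop := ∀ (board : List (List Int)) (piece_type : Int), Dom_find_died_pieces board piece_type → Pre_find_died_pieces board piece_type → Spec_find_died_pieces board piece_type (find_died_pieces board piece_type)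

-- ===== LEMMAS AND PROOFS =====

-- ---- geometric layer -------------------------------------------------------
abbrev InR (n : Nat) (p : Int × Int) : Prop :=
  0 ≤ p.1 ∧ p.1 < (n : Int) ∧ 0 ≤ p.2 ∧ p.2 < (n : Int)

abbrev AdjP (n : Nat) (p q : Int × Int) : Prop :=
  InR n p ∧ InR n q ∧
    ((p.1 = q.1 ∧ (p.2 = q.2 + 1 ∨ p.2 = q.2 - 1)) ∨
     (p.2 = q.2 ∧ (p.1 = q.1 + 1 ∨ p.1 = q.1 - 1)))

abbrev StepC (board : List (List Int)) (q p : Int × Int) : Prop :=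
  AdjP board.length p q ∧ cellAt board p.1 p.2 = cellAt board q.1 q.2

abbrev ReachC (board : List (List Int)) : (Int × Int) → (Int × Int) → Prop :=
  Relation.ReflTransGen (StepC board)

abbrev HasLib (board : List (List Int)) (p : Int × Int) : Prop :=
  ∃ nb ∈ detect_neighbor board p.1 p.2, cellAt board nb.1 nb.2 = 0

abbrev SeedP (board : List (List Int)) (t : Int) (p : Int × Int) : Prop :=
  InR board.length p ∧ cellAt board p.1 p.2 = t ∧ HasLib board p

abbrev AliveP (board : List (List Int)) (t : Int) (p : Int × Int) : Prop :=
  ∃ s, SeedP board t s ∧ ReachC board s p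

theorem bNeighbors_len_eq (board : List (List Int)) (i j : Int) :
    bNeighbors (PySem.List.len board) i j = detect_neighbor board i j := rfl

theorem mem_detect_neighbor {board : List (List Int)} {q p : Int × Int}
    (hq : InR board.length q) :
    p ∈ detect_neighbor board q.1 q.2 ↔ AdjP board.length p q := by
  obtain ⟨i, j⟩ := q; obtain ⟨a, b⟩ := p
  simp only [detect_neighbor, AdjP, InR, PySem.List.len_eq, List.mem_append,
    List.mem_ite_nil_right, List.mem_singleton, Prod.mk.injEq] at *
  omega

theorem adjP_symm {n : Nat} {p q : Int × Int} (h : AdjP n p q) : AdjP n q p := by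
  obtain ⟨i, j⟩ := q; obtain ⟨a, b⟩ := p
  simp only [AdjP, InR] at *
  omega

theorem stepC_symm {board : List (List Int)} : Symmetric (StepC board) :=
  fun _ _ h => ⟨adjP_symm h.1, h.2.symm⟩

theorem reachC_symm {board : List (List Int)} {p q : Int × Int}
    (h : ReachC board p q) : ReachC board q p :=
  Relation.ReflTransGen.symmetric stepC_symm h

theorem reachC_cell {board : List (List Int)} {p q : Int × Int} (h : ReachC board p q) :
    cellAt board q.1 q.2 = cellAt board p.1 p.2 := by
  induction h with
  | refl => rfl
  | tail _ hstep ih => exact hstep.2.trans ih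

theorem reachC_inr {board : List (List Int)} {p q : Int × Int}
    (hp : InR board.length p) (h : ReachC board p q) : InR board.length q := by
  induction h with
  | refl => exact hp
  | tail _ hstep _ => exact hstep.1.1

theorem mem_detect_neighbor_ally {board : List (List Int)} {q p : Int × Int}
    (hq : InR board.length q) :
    p ∈ detect_neighbor_ally board q.1 q.2 ↔ StepC board q p := by
  unfold detect_neighbor_ally
  rw [PySem.List.foldl_append_ite_eq_filter]
  simp only [List.nil_append, List.mem_filter, decide_eq_true_eq, StepC,
    mem_detect_neighbor hq]

-- ---- the grid as a list ----------------------------------------------------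
def cellsL (n : Nat) : List (Int × Int) :=
  (PySem.List.pyRange 0 (n : Int) 1) ×ˢ (PySem.List.pyRange 0 (n : Int) 1)

theorem mem_cellsL {n : Nat} {p : Int × Int} : p ∈ cellsL n ↔ InR n p := by
  obtain ⟨a, b⟩ := p
  simp [cellsL, PySem.List.mem_pyRange_one, InR, and_assoc]

theorem length_cellsL (n : Nat) : (cellsL n).length = n * n := by
  simp [cellsL, List.length_product, PySem.List.length_pyRange_one]

-- the same grid, indexed by the Int bound the ports use (cellsLI (len board) ≡ cellsL board.length)
def cellsLI (m : Int) : List (Int × Int) :=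
  (PySem.List.pyRange 0 m 1) ×ˢ (PySem.List.pyRange 0 m 1)

theorem nodup_cellsLI (m : Int) : (cellsLI m).Nodup :=
  List.Nodup.product (PySem.List.nodup_pyRange_one 0 m) (PySem.List.nodup_pyRange_one 0 m)

theorem mem_cellsLI_len {board : List (List Int)} {x : Int × Int} :
    x ∈ cellsLI (PySem.List.len board) ↔ InR board.length x := by
  rw [PySem.List.len_eq]
  exact mem_cellsL

theorem length_cellsLI_len (board : List (List Int)) :
    (cellsLI (PySem.List.len board)).length = board.length * board.length := by
  rw [PySem.List.len_eq]
  exact length_cellsL board.length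

theorem length_le_sq {n : Nat} {l : List (Int × Int)} (hn : l.Nodup)
    (h : ∀ p ∈ l, InR n p) : l.length ≤ n * n := by
  have hsub : l ⊆ cellsL n := fun p hp => mem_cellsL.2 (h p hp)
  have h1 := (List.subperm_of_subset hn hsub).length_le
  have h2 := length_cellsL n
  omega
theorem foldl_grid {α : Type} (m : Int) (G : α → Int → Int → α) (init : α) :
    (PySem.List.pyRange 0 m 1).foldl
      (fun acc i => (PySem.List.pyRange 0 m 1).foldl (fun acc j => G acc i j) acc)
      init = (cellsLI m).foldl (fun acc p => G acc p.1 p.2) init := by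
  show _ = ((PySem.List.pyRange 0 m 1).flatMap
      (fun i => (PySem.List.pyRange 0 m 1).map (fun j => (i, j)))).foldl
        (fun acc p => G acc p.1 p.2) init
  rw [List.foldl_flatMap]
  simp [List.foldl_map]

theorem nodup_split {l₁ l₂ : List (Int × Int)} (h : (l₁ ++ l₂).Nodup) :
    l₁.Nodup ∧ l₂.Nodup ∧ ∀ x ∈ l₁, x ∉ l₂ := by
  refine ⟨(List.sublist_append_left _ _).nodup h, (List.sublist_append_right _ _).nodup h, ?_⟩
  intro x hx hx'
  exact (List.disjoint_of_nodup_append h) hx hx'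

theorem nodup_glue {l₁ l₂ : List (Int × Int)} (h1 : l₁.Nodup) (h2 : l₂.Nodup)
    (h3 : ∀ x ∈ l₁, x ∉ l₂) : (l₁ ++ l₂).Nodup := by
  refine List.Nodup.append h1 h2 ?_
  intro a ha ha'
  exact h3 a ha ha'

-- ---- A's DFS worklist ------------------------------------------------------
def pushA (avoid : List (Int × Int)) (st : List (Int × Int)) (l : List (Int × Int)) :
    List (Int × Int) :=
  l.foldl (fun st a => if a ∈ st ∨ a ∈ avoid then st else a :: st) st

theorem subset_pushA (avoid : List (Int × Int)) :
    ∀ (l st : List (Int × Int)), st ⊆ pushA avoid st l := by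
  intro l
  induction l with
  | nil => intro st; exact fun _ h => h
  | cons a l ih =>
      intro st
      show st ⊆ pushA avoid (if a ∈ st ∨ a ∈ avoid then st else a :: st) l
      split
      · exact ih st
      · exact fun x hx => ih (a :: st) (List.mem_cons_of_mem a hx)

theorem mem_pushA (avoid : List (Int × Int)) :
    ∀ (l st : List (Int × Int)) (x : Int × Int), x ∈ pushA avoid st l → x ∈ st ∨ x ∈ l := by
  intro l
  induction l with
  | nil => intro st x hx; exact Or.inl hx
  | cons a l ih =>
      intro st x hx
      rw [show pushA avoid st (a :: l) = pushA avoid (if a ∈ st ∨ a ∈ avoid then st else a :: st) l from rfl] at hx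
      rcases ih _ x hx with h | h
      · revert h; split
        · exact fun h => Or.inl h
        · intro h
          rcases List.mem_cons.1 h with h | h
          · exact Or.inr (h ▸ List.mem_cons_self)
          · exact Or.inl h
      · exact Or.inr (List.mem_cons_of_mem a h)

theorem pushA_nodup (avoid : List (Int × Int)) :
    ∀ (l st : List (Int × Int)), st.Nodup → (∀ x ∈ st, x ∉ avoid) →
      (pushA avoid st l).Nodup ∧ (∀ x ∈ pushA avoid st l, x ∉ avoid) := by
  intro l
  induction l with
  | nil => intro st h1 h2; exact ⟨h1, h2⟩
  | cons a l ih =>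
      intro st h1 h2
      rw [show pushA avoid st (a :: l) = pushA avoid (if a ∈ st ∨ a ∈ avoid then st else a :: st) l from rfl]
      split
      · exact ih st h1 h2
      · rename_i hcond
        rw [not_or] at hcond
        refine ih (a :: st) (List.nodup_cons.2 ⟨hcond.1, h1⟩) ?_
        intro x hx
        rcases List.mem_cons.1 hx with h | h
        · exact h ▸ hcond.2
        · exact h2 x h

theorem pushA_covers (avoid : List (Int × Int)) :
    ∀ (l st : List (Int × Int)), ∀ a ∈ l, a ∈ pushA avoid st l ∨ a ∈ avoid := by
  intro l
  induction l with
  | nil => intro st a ha; cases ha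
  | cons b l ih =>
      intro st a ha
      rw [show pushA avoid st (b :: l) = pushA avoid (if b ∈ st ∨ b ∈ avoid then st else b :: st) l from rfl]
      rcases List.mem_cons.1 ha with h | h
      · subst h
        by_cases hb : a ∈ st ∨ a ∈ avoid
        · rw [if_pos hb]
          rcases hb with hb | hb
          · exact Or.inl (subset_pushA avoid l st hb)
          · exact Or.inr hb
        · rw [if_neg hb]
          exact Or.inl (subset_pushA avoid l (a :: st) List.mem_cons_self)
      · exact ih _ a h

theorem dfs_main (board : List (List Int)) (c : Int × Int) :
    ∀ (f : Nat) (stack members : List (Int × Int)),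
      (members ++ stack).Nodup →
      (∀ p ∈ members ++ stack, InR board.length p) →
      (∀ p ∈ members ++ stack, ReachC board c p) →
      (∀ p ∈ members, ∀ a, StepC board p a → a ∈ members ++ stack) →
      board.length * board.length + 1 ≤ f + members.length →
      (∀ p ∈ members ++ stack, p ∈ allyDfsLoop board f stack members) ∧
      (∀ p ∈ allyDfsLoop board f stack members, ReachC board c p) ∧
      (∀ p ∈ allyDfsLoop board f stack members, ∀ a,
        StepC board p a → a ∈ allyDfsLoop board f stack members) := by
  intro f
  induction f with
  | zero =>
      intro stack members h1 h2 h3 h4 h5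
      exfalso
      have hm : members.Nodup := (nodup_split h1).1
      have hmr : ∀ p ∈ members, InR board.length p :=
        fun p hp => h2 p (List.mem_append_left _ hp)
      have := length_le_sq hm hmr
      omega
  | succ f ih =>
      intro stack members h1 h2 h3 h4 h5
      cases stack with
      | nil =>
          refine ⟨fun p hp => ?_, fun p hp => h3 p (by simpa using hp), fun p hp a ha => ?_⟩
          · simpa [allyDfsLoop] using (by simpa using hp : p ∈ members)
          · have := h4 p (by simpa [allyDfsLoop] using hp) a ha
            simpa [allyDfsLoop] using this
      | cons p rest =>
          have hstep : allyDfsLoop board (f + 1) (p :: rest) members =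
              allyDfsLoop board f
                (pushA (members ++ [p]) rest (detect_neighbor_ally board p.1 p.2))
                (members ++ [p]) := rfl
          set members' := members ++ [p] with hm'
          set stack' := pushA members' rest (detect_neighbor_ally board p.1 p.2) with hs'
          have hpmem : p ∈ members ++ p :: rest := List.mem_append_right _ List.mem_cons_self
          have hInRp : InR board.length p := h2 p hpmem
          have hallies : ∀ a ∈ detect_neighbor_ally board p.1 p.2, StepC board p a :=
            fun a ha => (mem_detect_neighbor_ally hInRp).1 ha
          have hnd := nodup_split h1
          have hndm : members.Nodup := hnd.1
          have hndpr : (p :: rest).Nodup := hnd.2.1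
          have hdisj : ∀ x ∈ members, x ∉ p :: rest := hnd.2.2
          have hpnm : p ∉ members := fun hp => hdisj p hp List.mem_cons_self
          have hndm' : members'.Nodup := by
            rw [hm']
            exact nodup_glue hndm (List.nodup_singleton p)
              (fun x hx hx' => hpnm ((List.mem_singleton.1 hx') ▸ hx))
          have hrest_avoid : ∀ x ∈ rest, x ∉ members' := by
            intro x hx hx'
            rcases List.mem_append.1 hx' with h | h
            · exact hdisj x h (List.mem_cons_of_mem p hx)
            · exact (List.nodup_cons.1 hndpr).1 ((List.mem_singleton.1 h) ▸ hx)
          have hpush := pushA_nodup members' (detect_neighbor_ally board p.1 p.2) rest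
            (List.nodup_cons.1 hndpr).2 hrest_avoid
          -- new invariants
          have h1' : (members' ++ stack').Nodup :=
            nodup_glue hndm' hpush.1 (fun x hx hx' => hpush.2 x hx' hx)
          have hmem_stack' : ∀ x ∈ stack', x ∈ rest ∨ x ∈ detect_neighbor_ally board p.1 p.2 :=
            fun x hx => mem_pushA members' _ rest x hx
          have h2' : ∀ q ∈ members' ++ stack', InR board.length q := by
            intro q hq
            rcases List.mem_append.1 hq with h | h
            · rcases List.mem_append.1 h with h | h
              · exact h2 q (List.mem_append_left _ h)
              · exact (List.mem_singleton.1 h) ▸ hInRp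
            · rcases hmem_stack' q h with h | h
              · exact h2 q (List.mem_append_right _ (List.mem_cons_of_mem p h))
              · exact (hallies q h).1.1
          have h3' : ∀ q ∈ members' ++ stack', ReachC board c q := by
            intro q hq
            rcases List.mem_append.1 hq with h | h
            · rcases List.mem_append.1 h with h | h
              · exact h3 q (List.mem_append_left _ h)
              · exact (List.mem_singleton.1 h) ▸ h3 p hpmem
            · rcases hmem_stack' q h with h | h
              · exact h3 q (List.mem_append_right _ (List.mem_cons_of_mem p h))
              · exact Relation.ReflTransGen.tail (h3 p hpmem) (hallies q h)
          have h4' : ∀ q ∈ members', ∀ a, StepC board q a → a ∈ members' ++ stack' := by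
            intro q hq a ha
            rcases List.mem_append.1 hq with h | h
            · have := h4 q h a ha
              rcases List.mem_append.1 this with h' | h'
              · exact List.mem_append_left _ (List.mem_append_left _ h')
              · rcases List.mem_cons.1 h' with h' | h'
                · exact List.mem_append_left _ (List.mem_append_right _ (by simp [h']))
                · exact List.mem_append_right _ (subset_pushA members' _ rest h')
            · have hq' : q = p := List.mem_singleton.1 h
              subst hq'
              have hamem : a ∈ detect_neighbor_ally board q.1 q.2 :=
                (mem_detect_neighbor_ally hInRp).2 ha
              rcases pushA_covers members' (detect_neighbor_ally board q.1 q.2) rest a hamem with h | h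
              · exact List.mem_append_right _ h
              · exact List.mem_append_left _ h
          have h5' : board.length * board.length + 1 ≤ f + members'.length := by
            rw [hm', List.length_append, List.length_singleton]; omega
          obtain ⟨c1, c2, c3⟩ := ih stack' members' h1' h2' h3' h4' h5'
          rw [hstep]
          refine ⟨?_, c2, c3⟩
          intro q hq
          rcases List.mem_append.1 hq with h | h
          · exact c1 q (List.mem_append_left _ (List.mem_append_left _ h))
          · rcases List.mem_cons.1 h with h | h
            · exact c1 q (List.mem_append_left _ (List.mem_append_right _ (by simp [h])))
            · exact c1 q (List.mem_append_right _ (subset_pushA members' _ rest h))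

theorem ally_dfs_iff {board : List (List Int)} {c : Int × Int}
    (hc : InR board.length c) (p : Int × Int) :
    p ∈ ally_dfs board c.1 c.2 ↔ ReachC board c p := by
  have main := dfs_main board c (board.length * board.length + 1) [c] []
    (by simp) (by simpa using hc) (by simpa using Relation.ReflTransGen.refl)
    (by simp) (by simp)
  have hform : allyDfsLoop board (board.length * board.length + 1) [(c.1, c.2)] [] =
      ally_dfs board c.1 c.2 := rfl
  constructor
  · intro h; exact main.2.1 p h
  · intro h
    induction h with
    | refl => exact main.1 c (by simp)
    | tail hr hstep ih' => exact main.2.2 _ ih' _ hstep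

-- ---- A's liberty set -------------------------------------------------------
theorem mem_setfold_if {cond : (Int × Int) → Prop} [DecidablePred cond] :
    ∀ (l : List (Int × Int)) (s : PySem.Set (Int × Int)) (x : Int × Int),
      (x ∈ l.foldl (fun s p => if cond p then PySem.Set.add s (p.1, p.2) else s) s) ↔
        (x ∈ s ∨ ∃ p ∈ l, cond p ∧ x = p) := by
  intro l
  induction l with
  | nil => simp
  | cons a l ih =>
      intro s x
      simp only [List.foldl_cons, ih, List.mem_cons]
      split
      · rw [PySem.Set.mem_add]
        constructor
        · rintro (( h | h) | h)
          · exact Or.inl h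
          · exact Or.inr ⟨a, Or.inl rfl, by simpa [‹cond a›] using h⟩
          · obtain ⟨p, hp, hc, hx⟩ := h; exact Or.inr ⟨p, Or.inr hp, hc, hx⟩
        · rintro (h | ⟨p, (rfl | hp), hc, hx⟩)
          · exact Or.inl (Or.inl h)
          · exact Or.inl (Or.inr (by simp [hx]))
          · exact Or.inr ⟨p, hp, hc, hx⟩
      · constructor
        · rintro (h | ⟨p, hp, hc, hx⟩)
          · exact Or.inl h
          · exact Or.inr ⟨p, Or.inr hp, hc, hx⟩
        · rintro (h | ⟨p, (rfl | hp), hc, hx⟩)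
          · exact Or.inl h
          · exact absurd hc ‹¬ cond p›
          · exact Or.inr ⟨p, hp, hc, hx⟩

theorem mem_libfold (board : List (List Int)) :
    ∀ (L : List (Int × Int)) (s : PySem.Set (Int × Int)) (x : Int × Int),
      (x ∈ L.foldl (fun s m => (detect_neighbor board m.1 m.2).foldl
          (fun s p => if cellAt board p.1 p.2 = 0 then PySem.Set.add s (p.1, p.2) else s) s) s) ↔
        (x ∈ s ∨ ∃ m ∈ L, ∃ nb ∈ detect_neighbor board m.1 m.2,
          cellAt board nb.1 nb.2 = 0 ∧ x = nb) := by
  intro L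
  induction L with
  | nil => simp
  | cons m L ih =>
      intro s x
      simp only [List.foldl_cons, ih, List.mem_cons]
      rw [mem_setfold_if (cond := fun p => cellAt board p.1 p.2 = 0)]
      constructor
      · rintro ((h | ⟨p, hp, hc, hx⟩) | ⟨m', hm', hrest⟩)
        · exact Or.inl h
        · exact Or.inr ⟨m, Or.inl rfl, p, hp, hc, hx⟩
        · exact Or.inr ⟨m', Or.inr hm', hrest⟩
      · rintro (h | ⟨m', (rfl | hm'), p, hp, hc, hx⟩)
        · exact Or.inl (Or.inl h)
        · exact Or.inl (Or.inr ⟨p, hp, hc, hx⟩)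
        · exact Or.inr ⟨m', hm', p, hp, hc, hx⟩

theorem deadA_iff {board : List (List Int)} {c : Int × Int} (hc : InR board.length c) :
    PySem.Set.len (find_liberty_positions board c.1 c.2) = 0 ↔
      ¬ ∃ d, ReachC board c d ∧ HasLib board d := by
  have hmem : ∀ x, x ∈ find_liberty_positions board c.1 c.2 ↔
      ∃ m ∈ ally_dfs board c.1 c.2, ∃ nb ∈ detect_neighbor board m.1 m.2,
        cellAt board nb.1 nb.2 = 0 ∧ x = nb := by
    intro x
    unfold find_liberty_positions
    rw [mem_libfold]
    simp [PySem.Set.empty]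
  have hlen : PySem.Set.len (find_liberty_positions board c.1 c.2) = 0 ↔
      ∀ x, x ∉ find_liberty_positions board c.1 c.2 := by
    simp only [PySem.Set.len]
    rw [Int.natCast_eq_zero, List.length_eq_zero_iff, List.eq_nil_iff_forall_not_mem]
  rw [hlen]
  constructor
  · rintro h ⟨d, hr, hlib⟩
    obtain ⟨nb, hnb, h0⟩ := hlib
    exact h nb ((hmem nb).2 ⟨d, (ally_dfs_iff hc d).2 hr, nb, hnb, h0, rfl⟩)
  · rintro h x hx
    obtain ⟨m, hm, nb, hnb, h0, hxe⟩ := (hmem x).1 hx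
    exact h ⟨m, (ally_dfs_iff hc m).1 hm, nb, hnb, h0⟩

-- ---- B's sweep -------------------------------------------------------------
def pushB (board : List (List Int)) (t : Int)
    (st : PySem.Set (Int × Int) × List (Int × Int)) (l : List (Int × Int)) :
    PySem.Set (Int × Int) × List (Int × Int) :=
  l.foldl (fun st a =>
    if cellAt board a.1 a.2 = t ∧ ¬ (a ∈ st.1) then (PySem.Set.add st.1 a, a :: st.2) else st) st

theorem pushB_step (board : List (List Int)) (t : Int)
    (st : PySem.Set (Int × Int) × List (Int × Int)) (a : Int × Int) (l : List (Int × Int)) :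
    pushB board t st (a :: l) = pushB board t
      (if cellAt board a.1 a.2 = t ∧ ¬ (a ∈ st.1) then (PySem.Set.add st.1 a, a :: st.2) else st) l := rfl

theorem pushB_props (board : List (List Int)) (t : Int) :
    ∀ (l : List (Int × Int)) (st : PySem.Set (Int × Int) × List (Int × Int)),
      (∀ x ∈ st.1, x ∈ (pushB board t st l).1) ∧
      (∀ x ∈ (pushB board t st l).1, x ∈ st.1 ∨ (x ∈ l ∧ cellAt board x.1 x.2 = t)) ∧
      (st.1.Nodup → (pushB board t st l).1.Nodup) ∧
      (∀ a ∈ l, cellAt board a.1 a.2 = t → a ∈ (pushB board t st l).1) ∧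
      (∀ x ∈ (pushB board t st l).2, x ∈ st.2 ∨ x ∈ (pushB board t st l).1) ∧
      ((pushB board t st l).2.length + st.1.length = st.2.length + (pushB board t st l).1.length) := by
  intro l
  induction l with
  | nil =>
      intro st
      exact ⟨fun x h => h, fun x h => Or.inl h, fun h => h, fun a h => absurd h (List.not_mem_nil),
        fun x h => Or.inl h, rfl⟩
  | cons a l ih =>
      intro st
      rw [pushB_step]
      by_cases hc : cellAt board a.1 a.2 = t ∧ ¬ (a ∈ st.1)
      · rw [if_pos hc]
        have hadd : PySem.Set.add st.1 a = st.1 ++ [a] := PySem.Set.add_of_not_mem hc.2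
        obtain ⟨i1, i2, i3, i4, i5, i6⟩ := ih (PySem.Set.add st.1 a, a :: st.2)
        refine ⟨?_, ?_, ?_, ?_, ?_, ?_⟩
        · intro x hx
          exact i1 x (by rw [PySem.Set.mem_add]; exact Or.inl hx)
        · intro x hx
          rcases i2 x hx with h | h
          · rcases (PySem.Set.mem_add st.1 a x).1 h with h | h
            · exact Or.inl h
            · exact Or.inr ⟨h ▸ List.mem_cons_self, h ▸ hc.1⟩
          · exact Or.inr ⟨List.mem_cons_of_mem a h.1, h.2⟩
        · intro hnd
          refine i3 ?_
          rw [hadd]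
          exact nodup_glue hnd (List.nodup_singleton a)
            (fun x hx hx' => hc.2 ((List.mem_singleton.1 hx') ▸ hx))
        · intro b hb hcb
          rcases List.mem_cons.1 hb with h | h
          · exact h ▸ i1 a (by rw [PySem.Set.mem_add]; exact Or.inr rfl)
          · exact i4 b h hcb
        · intro x hx
          rcases i5 x hx with h | h
          · rcases List.mem_cons.1 h with h | h
            · exact Or.inr (h ▸ i1 a (by rw [PySem.Set.mem_add]; exact Or.inr rfl))
            · exact Or.inl h
          · exact Or.inr h
        · have : (PySem.Set.add st.1 a).length = st.1.length + 1 := by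
            rw [hadd, List.length_append, List.length_singleton]
          simp only [List.length_cons] at i6 ⊢
          omega
      · rw [if_neg hc]
        obtain ⟨i1, i2, i3, i4, i5, i6⟩ := ih st
        refine ⟨i1, ?_, i3, ?_, i5, i6⟩
        · intro x hx
          rcases i2 x hx with h | h
          · exact Or.inl h
          · exact Or.inr ⟨List.mem_cons_of_mem a h.1, h.2⟩
        · intro b hb hcb
          rcases List.mem_cons.1 hb with h | h
          · subst h
            rcases not_and_or.1 hc with h' | h'
            · exact absurd hcb h'
            · exact i1 b (not_not.1 h')
          · exact i4 b h hcb


theorem pushB_queue_subset (board : List (List Int)) (t : Int) :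
    ∀ (l : List (Int × Int)) (st : PySem.Set (Int × Int) × List (Int × Int)),
      ∀ x ∈ st.2, x ∈ (pushB board t st l).2 := by
  intro l
  induction l with
  | nil => intro st x hx; exact hx
  | cons a l ih =>
      intro st x hx
      rw [pushB_step]
      split
      · exact ih _ x (List.mem_cons_of_mem a hx)
      · exact ih _ x hx

theorem pushB_new_in_queue (board : List (List Int)) (t : Int) :
    ∀ (l : List (Int × Int)) (st : PySem.Set (Int × Int) × List (Int × Int)),
      ∀ x ∈ (pushB board t st l).1, x ∉ st.1 → x ∈ (pushB board t st l).2 := by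
  intro l
  induction l with
  | nil => intro st x hx hx'; exact absurd hx hx'
  | cons a l ih =>
      intro st x hx hx'
      rw [pushB_step] at hx ⊢
      by_cases hc : cellAt board a.1 a.2 = t ∧ ¬ (a ∈ st.1)
      · rw [if_pos hc] at hx ⊢
        by_cases hxa : x = a
        · subst hxa
          exact pushB_queue_subset board t l _ x List.mem_cons_self
        · refine ih _ x hx ?_
          intro hmem
          rcases (PySem.Set.mem_add st.1 a x).1 hmem with h | h
          · exact hx' h
          · exact hxa h
      · rw [if_neg hc] at hx ⊢
        exact ih _ x hx hx'

theorem sweep_main (board : List (List Int)) (t : Int) :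
    ∀ (f : Nat) (alive : PySem.Set (Int × Int)) (queue : List (Int × Int)),
      alive.Nodup →
      (∀ p ∈ alive, InR board.length p) →
      (∀ p ∈ queue, p ∈ alive) →
      (∀ p ∈ alive, AliveP board t p) →
      (∀ p ∈ alive, p ∈ queue ∨ ∀ a, StepC board p a → a ∈ alive) →
      queue.length + board.length * board.length ≤ f + alive.length →
      (∀ p ∈ alive, p ∈ bSweep board t f alive queue) ∧
      (∀ p ∈ bSweep board t f alive queue, AliveP board t p) ∧
      (∀ p ∈ bSweep board t f alive queue, ∀ a,
        StepC board p a → a ∈ bSweep board t f alive queue) := by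
  intro f
  induction f with
  | zero =>
      intro alive queue h1 h2 h3 h4 h5 h6
      have : alive.length ≤ board.length * board.length := length_le_sq h1 h2
      have hq : queue.length = 0 := by omega
      have hqnil : queue = [] := List.length_eq_zero_iff.1 hq
      subst hqnil
      refine ⟨fun p hp => by simpa [bSweep] using hp, fun p hp => h4 p (by simpa [bSweep] using hp),
        fun p hp a ha => ?_⟩
      have hp' : p ∈ alive := by simpa [bSweep] using hp
      rcases h5 p hp' with h | h
      · cases h
      · simpa [bSweep] using h a ha
  | succ f ih =>
      intro alive queue h1 h2 h3 h4 h5 h6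
      cases queue with
      | nil =>
          refine ⟨fun p hp => by simpa [bSweep] using hp, fun p hp => h4 p (by simpa [bSweep] using hp),
            fun p hp a ha => ?_⟩
          have hp' : p ∈ alive := by simpa [bSweep] using hp
          rcases h5 p hp' with h | h
          · cases h
          · simpa [bSweep] using h a ha
      | cons p rest =>
          have hstep : bSweep board t (f + 1) alive (p :: rest) =
              bSweep board t f (pushB board t (alive, rest) (detect_neighbor board p.1 p.2)).1
                (pushB board t (alive, rest) (detect_neighbor board p.1 p.2)).2 := rfl
          set st' := pushB board t (alive, rest) (detect_neighbor board p.1 p.2) with hst'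
          obtain ⟨i1, i2, i3, i4, i5, i6⟩ := pushB_props board t (detect_neighbor board p.1 p.2) (alive, rest)
          have hpal : p ∈ alive := h3 p List.mem_cons_self
          have hInRp : InR board.length p := h2 p hpal
          have hcellp : cellAt board p.1 p.2 = t := by
            obtain ⟨s, hs, hr⟩ := h4 p hpal
            rw [reachC_cell hr]; exact hs.2.1
          have halive' : ∀ x ∈ st'.1, x ∈ alive ∨ (AdjP board.length x p ∧ cellAt board x.1 x.2 = t) := by
            intro x hx
            rcases i2 x hx with h | h
            · exact Or.inl h
            · exact Or.inr ⟨(mem_detect_neighbor hInRp).1 h.1, h.2⟩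
          have h1' : st'.1.Nodup := i3 h1
          have h2' : ∀ q ∈ st'.1, InR board.length q := by
            intro q hq
            rcases halive' q hq with h | h
            · exact h2 q h
            · exact h.1.1
          have h3' : ∀ q ∈ st'.2, q ∈ st'.1 := by
            intro q hq
            rcases i5 q hq with h | h
            · exact i1 q (h3 q (List.mem_cons_of_mem p h))
            · exact h
          have h4' : ∀ q ∈ st'.1, AliveP board t q := by
            intro q hq
            rcases halive' q hq with h | h
            · exact h4 q h
            · obtain ⟨s, hs, hr⟩ := h4 p hpal
              exact ⟨s, hs, Relation.ReflTransGen.tail hr ⟨h.1, h.2.trans hcellp.symm⟩⟩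
          have h5' : ∀ q ∈ st'.1, q ∈ st'.2 ∨ ∀ a, StepC board q a → a ∈ st'.1 := by
            intro q hq
            by_cases hqa : q ∈ alive
            · rcases h5 q hqa with h' | h'
              · rcases List.mem_cons.1 h' with h'' | h''
                · subst h''
                  refine Or.inr (fun a ha => ?_)
                  have hadj : a ∈ detect_neighbor board q.1 q.2 := (mem_detect_neighbor hInRp).2 ha.1
                  exact i4 a hadj (ha.2.trans hcellp)
                · exact Or.inl (pushB_queue_subset board t _ (alive, rest) q h'')
              · exact Or.inr (fun a ha => i1 a (h' a ha))
            · exact Or.inl (pushB_new_in_queue board t _ (alive, rest) q hq hqa)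
          have i6' : st'.2.length + alive.length = rest.length + st'.1.length := by
            simpa using i6
          have h6' : st'.2.length + board.length * board.length ≤ f + st'.1.length := by
            simp only [List.length_cons] at h6
            omega
          obtain ⟨c1, c2, c3⟩ := ih st'.1 st'.2 h1' h2' h3' h4' h5' h6'
          rw [hstep]
          exact ⟨fun q hq => c1 q (i1 q hq), c2, c3⟩

-- ---- seeding pass ----------------------------------------------------------
abbrev predS (board : List (List Int)) (t : Int) (x : Int × Int) : Prop :=
  cellAt board x.1 x.2 = t ∧
    ((bNeighbors (PySem.List.len board) x.1 x.2).any
      (fun a => cellAt board a.1 a.2 == 0)) = true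

abbrev seedsList (board : List (List Int)) (t : Int) : List (Int × Int) :=
  (cellsLI (PySem.List.len board)).filter (fun x => decide (predS board t x))

abbrev aliveSet (board : List (List Int)) (t : Int) : PySem.Set (Int × Int) :=
  bSweep board t (board.length * board.length + 1) (seedsList board t)
    ((seedsList board t).reverse)

abbrev predA (board : List (List Int)) (t : Int) (x : Int × Int) : Prop :=
  cellAt board x.1 x.2 = t ∧ PySem.Set.len (find_liberty_positions board x.1 x.2) = 0

abbrev predB (board : List (List Int)) (t : Int) (x : Int × Int) : Prop :=
  cellAt board x.1 x.2 = t ∧ ¬ (x ∈ aliveSet board t)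

theorem seedsFold (pred : (Int × Int) → Prop) [DecidablePred pred] :
    ∀ (L : List (Int × Int)) (s q : List (Int × Int)),
      L.Nodup → (∀ x ∈ L, x ∉ s) →
      (L.foldl (fun (st : PySem.Set (Int × Int) × List (Int × Int)) x =>
          if pred x then (PySem.Set.add st.1 x, x :: st.2) else st) (s, q))
        = (s ++ L.filter (fun x => decide (pred x)),
           (L.filter (fun x => decide (pred x))).reverse ++ q) := by
  intro L
  induction L with
  | nil => intro s q _ _; simp
  | cons a L ih =>
      intro s q hnd hdisj
      simp only [List.foldl_cons, List.filter_cons]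
      by_cases hp : pred a
      · rw [if_pos hp, PySem.Set.add_of_not_mem (hdisj a List.mem_cons_self)]
        rw [ih (s ++ [a]) (a :: q) (List.nodup_cons.1 hnd).2 ?_]
        · simp [hp]
        · intro x hx hx'
          rcases List.mem_append.1 hx' with h | h
          · exact hdisj x (List.mem_cons_of_mem a hx) h
          · exact (List.nodup_cons.1 hnd).1 ((List.mem_singleton.1 h) ▸ hx)
      · rw [if_neg hp, ih s q (List.nodup_cons.1 hnd).2
          (fun x hx => hdisj x (List.mem_cons_of_mem a hx))]
        simp [hp]

theorem mem_seedsList {board : List (List Int)} {t : Int} {x : Int × Int} :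
    x ∈ seedsList board t ↔ SeedP board t x := by
  simp only [seedsList, List.mem_filter, mem_cellsLI_len, decide_eq_true_eq, predS,
    bNeighbors_len_eq, List.any_eq_true, beq_iff_eq, SeedP, HasLib]

theorem mem_aliveSet {board : List (List Int)} {t : Int} {x : Int × Int} :
    x ∈ aliveSet board t ↔ AliveP board t x := by
  have hnodup : (seedsList board t).Nodup := (nodup_cellsLI _).filter _
  have hinr : ∀ p ∈ seedsList board t, InR board.length p :=
    fun p hp => (mem_seedsList.1 hp).1
  have hlen : (seedsList board t).length ≤ board.length * board.length := by
    have h1 : (seedsList board t).length ≤ (cellsLI (PySem.List.len board)).length :=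
      List.length_filter_le _ _
    have h2 := length_cellsLI_len board
    omega
  have sw := sweep_main board t (board.length * board.length + 1)
    (seedsList board t) ((seedsList board t).reverse)
    hnodup hinr
    (fun p hp => List.mem_reverse.1 hp)
    (fun p hp => ⟨p, mem_seedsList.1 hp, Relation.ReflTransGen.refl⟩)
    (fun p hp => Or.inl (List.mem_reverse.2 hp))
    (by rw [List.length_reverse]; omega)
  constructor
  · exact fun h => sw.2.1 x h
  · rintro ⟨s, hs, hr⟩
    have hs' := sw.1 s (mem_seedsList.2 hs)
    induction hr with
    | refl => exact hs'
    | tail _ hstep ih => exact sw.2.2 _ ih _ hstep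

-- ---- both programs as row-major filters ------------------------------------
theorem grid_out (m : Int) (cond : (Int × Int) → Prop) [inst : DecidablePred cond] :
    (cellsLI m).foldl (fun acc p => if cond p then acc ++ [(p.1, p.2)] else acc) [] =
      (cellsLI m).filter (fun p => decide (cond p)) := by
  refine Eq.trans (PySem.List.foldl_congr_mem _ _
    (fun acc p => if cond p then acc ++ [p] else acc) _ ?_) ?_
  · intro acc x _
    obtain ⟨a, b⟩ := x
    rfl
  · rw [PySem.List.foldl_append_ite_eq_filter]
    exact List.nil_append _

theorem grid_seeds (m : Int) (cond : (Int × Int) → Prop) [inst : DecidablePred cond] :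
    (cellsLI m).foldl (fun (acc : PySem.Set (Int × Int) × List (Int × Int)) p =>
        if cond p then (PySem.Set.add acc.1 (p.1, p.2), (p.1, p.2) :: acc.2) else acc)
      (PySem.Set.empty, []) =
      ((cellsLI m).filter (fun p => decide (cond p)),
       ((cellsLI m).filter (fun p => decide (cond p))).reverse) := by
  refine Eq.trans (PySem.List.foldl_congr_mem _ _
    (fun (acc : PySem.Set (Int × Int) × List (Int × Int)) p =>
      if cond p then (PySem.Set.add acc.1 p, p :: acc.2) else acc) _ ?_) ?_
  · intro acc x _
    obtain ⟨a, b⟩ := x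
    rfl
  · have hemp : (PySem.Set.empty : PySem.Set (Int × Int)) = ([] : List (Int × Int)) := rfl
    rw [hemp, seedsFold cond (cellsLI m) [] [] (nodup_cellsLI m) (by simp)]
    simp

theorem A_eq_filter (board : List (List Int)) (t : Int) :
    find_died_pieces board t =
      (cellsLI (PySem.List.len board)).filter (fun x => decide (predA board t x)) := by
  unfold find_died_pieces
  simp only [← ite_and]
  simp only [foldl_grid, grid_out]

theorem B_eq_filter (board : List (List Int)) (t : Int) :
    find_died_pieces_alt board t =
      (cellsLI (PySem.List.len board)).filter (fun x => decide (predB board t x)) := by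
  unfold find_died_pieces_alt
  simp only [foldl_grid, grid_seeds, grid_out]

theorem predA_iff_predB {board : List (List Int)} {t : Int} {x : Int × Int}
    (hx : InR board.length x) : predA board t x ↔ predB board t x := by
  by_cases hc : cellAt board x.1 x.2 = t
  · simp only [predA, predB, hc, true_and]
    rw [deadA_iff hx, mem_aliveSet]
    apply not_congr
    constructor
    · rintro ⟨d, hr, hlib⟩
      exact ⟨d, ⟨reachC_inr hx hr, (reachC_cell hr).trans hc, hlib⟩, reachC_symm hr⟩
    · rintro ⟨s, hs, hr⟩
      exact ⟨s, reachC_symm hr, hs.2.2⟩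
  · simp [predA, predB, hc]

-- ===== VERDICT (by name: the statement is the Claim_ definition above) =====
theorem find_died_pieces_spec : Claim_equal_find_died_pieces := by
  intro board piece_type _ _
  unfold Spec_find_died_pieces
  rw [A_eq_filter, B_eq_filter]
  apply List.filter_congr
  intro x hx
  simp only [decide_eq_decide]
  exact predA_iff_predB (mem_cellsLI_len.1 hx)
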